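-- pv_equiv track=rewrite | github.com/icetea0113/KABOAT2023 | Python_HW/서지민/zodiac.py | find_earliest_zodiac
-- ===== SOURCE A (Python) =====
-- def find_earliest_zodiac(years):
--     zodiac_order = {
--         "Rat": 0,
--         "Ox": 1,
--         "Tiger": 2,
--         "Rabbit": 3,
--         "Dragon": 4,
--         "Snake": 5,
--         "Horse": 6,
--         "Sheep": 7,
--         "Monkey": 8,
--         "Rooster": 9,
--         "Dog": 10,
--         "Pig": 11
--     }
--
--     zodiac_counts = {}
--     earliest_zodiac = "Pig"
--
--     for year in years:
--         zodiac = (year - 4) % 12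
--         zodiac_name = list(zodiac_order.keys())[list(zodiac_order.values()).index(zodiac)]
--
--         if zodiac_name not in zodiac_counts:
--             zodiac_counts[zodiac_name] = 1
--         else:
--             zodiac_counts[zodiac_name] += 1
--
--         if zodiac_order[zodiac_name] < zodiac_order[earliest_zodiac]:
--             earliest_zodiac = zodiac_name
--
--     num_different_zodiacs = len(zodiac_counts)
--
--     return num_different_zodiacs, earliest_zodiac
-- ===== SOURCE B (Python) =====
-- def find_earliest_zodiac(years):
--     names = ["Rat", "Ox", "Tiger", "Rabbit", "Dragon", "Snake",
--              "Horse", "Sheep", "Monkey", "Rooster", "Dog", "Pig"]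
--     # bucket pass: mark which of the 12 zodiac slots occur
--     seen = [False] * 12
--     for y in years:
--         seen[(y - 4) % 12] = True
--     # one fixed downward sweep over the 12 buckets computes both answers
--     distinct, earliest = 0, 11
--     for i in range(11, -1, -1):
--         if seen[i]:
--             distinct, earliest = distinct + 1, i
--     return distinct, names[earliest]
-- ===== Notes on version B (the rewrite author's own statement) =====
-- stated objective: faster
-- what changed: Replaces the per-element dict-of-counts plus running-earliest with keys/values reverse lookup by bucketing: one pass marks a fixed 12-slot boolean table by residue, then a single fixed downward sweep over the 12 buckets yields both the distinct count and the earliest index, with one table lookup for the name.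
import Mathlib
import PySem

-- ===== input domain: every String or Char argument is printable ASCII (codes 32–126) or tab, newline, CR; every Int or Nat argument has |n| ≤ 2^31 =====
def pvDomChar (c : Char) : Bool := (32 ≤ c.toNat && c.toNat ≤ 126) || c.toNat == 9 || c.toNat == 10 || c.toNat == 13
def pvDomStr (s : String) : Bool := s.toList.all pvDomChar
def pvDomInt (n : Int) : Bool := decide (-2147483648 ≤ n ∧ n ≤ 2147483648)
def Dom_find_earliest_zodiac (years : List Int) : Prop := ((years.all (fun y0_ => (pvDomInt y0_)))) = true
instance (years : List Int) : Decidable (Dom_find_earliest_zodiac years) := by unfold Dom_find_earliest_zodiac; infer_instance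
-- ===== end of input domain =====

-- B replaces A's dict-of-counts loop (with a keys/values reverse lookup per element) by bucketing:
-- one pass marks a fixed 12-slot boolean table, then one fixed downward sweep over the 12 buckets
-- yields both the distinct count and the earliest index.

-- ===== PORT A =====
def pvZodiacOrder : PySem.Dict String Int :=
  PySem.Dict.ofList [("Rat", 0), ("Ox", 1), ("Tiger", 2), ("Rabbit", 3), ("Dragon", 4),
    ("Snake", 5), ("Horse", 6), ("Sheep", 7), ("Monkey", 8), ("Rooster", 9), ("Dog", 10), ("Pig", 11)]

-- zodiac_name = list(zodiac_order.keys())[list(zodiac_order.values()).index(zodiac)]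
-- (the ValueError/IndexError branches are unreachable: zodiac = (year-4) % 12 is always a value
-- of zodiac_order, so .index succeeds with an in-range position; the "" defaults never surface)
def pvZodiacNameA (zodiac : Int) : String :=
  match PySem.List.index? (PySem.Dict.values pvZodiacOrder) zodiac with
  | some i => (PySem.List.pyGet? (PySem.Dict.keys pvZodiacOrder) (i : Int)).getD ""
  | none => ""

-- one iteration of A's for-loop over (zodiac_counts, earliest_zodiac)
-- (zodiac_order[...] lookups: both keys are always present, so the 0 default never surfaces)
def pvStepA (st : PySem.Dict String Int × String) (year : Int) : PySem.Dict String Int × String :=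
  let zodiac := PySem.Int.mod (year - 4) 12
  let zodiac_name := pvZodiacNameA zodiac
  let counts :=
    if st.1.contains zodiac_name = false then st.1.insert zodiac_name 1
    else st.1.insert zodiac_name (st.1.getD zodiac_name 0 + 1)
  let earliest :=
    if pvZodiacOrder.getD zodiac_name 0 < pvZodiacOrder.getD st.2 0 then zodiac_name else st.2
  (counts, earliest)

def find_earliest_zodiac (years : List Int) : Int × String :=
  let st := years.foldl pvStepA (PySem.Dict.empty, "Pig")
  ((st.1.size : Int), st.2)

-- ===== PORT B =====
def pvNames : List String :=
  ["Rat", "Ox", "Tiger", "Rabbit", "Dragon", "Snake",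
   "Horse", "Sheep", "Monkey", "Rooster", "Dog", "Pig"]

-- seen[(y - 4) % 12] = True  (the index is always in [0,12), so .toNat is exact here)
def pvSeenStep (s : List Bool) (y : Int) : List Bool :=
  s.set (PySem.Int.mod (y - 4) 12).toNat true

-- for i in range(11, -1, -1): if seen[i]: distinct, earliest = distinct + 1, i
-- (i is always in [0,12) and seen has length 12, so seen[i] never raises; the false default never surfaces)
def pvSweepStep (seen : List Bool) (st : Int × Int) (i : Int) : Int × Int :=
  if (PySem.List.pyGet? seen i).getD false then (st.1 + 1, i) else st

-- names[earliest]: earliest is always in [0,12), so the "" default never surfaces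
def find_earliest_zodiac_alt (years : List Int) : Int × String :=
  let seen := years.foldl pvSeenStep (List.replicate 12 false)
  let st := (PySem.List.pyRange 11 (-1) (-1)).foldl (pvSweepStep seen) (0, 11)
  (st.1, (PySem.List.pyGet? pvNames st.2).getD "")

-- ===== PRECONDITION & SPEC =====
def Spec_find_earliest_zodiac (years : List Int) (out : Int × String) : Prop := out = find_earliest_zodiac_alt years
instance (years : List Int) (out : Int × String) : Decidable (Spec_find_earliest_zodiac years out) := by unfold Spec_find_earliest_zodiac; infer_instance

-- ===== CLAIM (what is proved, stated in full; the proofs are below) =====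
def Claim_equal_find_earliest_zodiac : Prop := ∀ (years : List Int), Dom_find_earliest_zodiac years → Spec_find_earliest_zodiac years (find_earliest_zodiac years)

-- ===== LEMMAS AND PROOFS =====

-- the zodiac index of a year
def pvIdx (y : Int) : Int := PySem.Int.mod (y - 4) 12

lemma pvIdx_bounds (y : Int) : 0 ≤ pvIdx y ∧ pvIdx y < 12 :=
  ⟨PySem.Int.mod_nonneg _ (by norm_num), PySem.Int.mod_lt _ (by norm_num)⟩

lemma pvName_eq (z : Int) (h0 : 0 ≤ z) (h1 : z < 12) :
    pvZodiacNameA z = (PySem.List.pyGet? pvNames z).getD "" := by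
  interval_cases z <;> decide

lemma pvOrder_name (z : Int) (h0 : 0 ≤ z) (h1 : z < 12) :
    pvZodiacOrder.getD (pvZodiacNameA z) 0 = z := by
  interval_cases z <;> decide

lemma pvName_inj (a b : Int) (ha0 : 0 ≤ a) (ha1 : a < 12) (hb0 : 0 ≤ b) (hb1 : b < 12)
    (h : pvZodiacNameA a = pvZodiacNameA b) : a = b := by
  rw [← pvOrder_name a ha0 ha1, h, pvOrder_name b hb0 hb1]

-- the two independent accumulators of A's loop, separated
def pvStepC (d : PySem.Dict String Int) (y : Int) : PySem.Dict String Int :=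
  d.insert (pvZodiacNameA (pvIdx y))
    (if d.contains (pvZodiacNameA (pvIdx y)) = false then 1
     else d.getD (pvZodiacNameA (pvIdx y)) 0 + 1)

def pvStepE (e : String) (y : Int) : String :=
  if pvZodiacOrder.getD (pvZodiacNameA (pvIdx y)) 0 < pvZodiacOrder.getD e 0 then
    pvZodiacNameA (pvIdx y)
  else e

lemma pvStepA_eq (c : PySem.Dict String Int) (e : String) (y : Int) :
    pvStepA (c, e) y = (pvStepC c y, pvStepE e y) := by
  simp only [pvStepA, pvStepC, pvStepE, pvIdx]
  split_ifs <;> rfl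

lemma pvFoldl_split (ys : List Int) (c : PySem.Dict String Int) (e : String) :
    ys.foldl pvStepA (c, e) = (ys.foldl pvStepC c, ys.foldl pvStepE e) := by
  induction ys generalizing c e with
  | nil => rfl
  | cons y t ih => simp only [List.foldl_cons, pvStepA_eq, ih]

-- counts side: the keys of the final dict are the distinct names, in first-insertion order
lemma pvKeys_counts (ys : List Int) :
    (ys.foldl pvStepC PySem.Dict.empty).keys =
      PySem.Set.ofList (ys.map (fun y => pvZodiacNameA (pvIdx y))) := by
  have h := PySem.Dict.keys_foldl_insert_key (ν := Int) ys
    (fun y => pvZodiacNameA (pvIdx y))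
    (fun d y => if d.contains (pvZodiacNameA (pvIdx y)) = false then 1
                else d.getD (pvZodiacNameA (pvIdx y)) 0 + 1)
    PySem.Dict.empty
  simpa [pvStepC, PySem.Set.update_nil_left] using h

-- distinct names = distinct indices, because the name map is injective on [0,12)
lemma pvLen_ofList_map (ys : List Int) :
    (PySem.Set.ofList (ys.map (fun y => pvZodiacNameA (pvIdx y)))).length =
      (PySem.Set.ofList (ys.map pvIdx)).length := by
  have hmapeq : ys.map (fun y => pvZodiacNameA (pvIdx y)) = (ys.map pvIdx).map pvZodiacNameA := by
    simp [List.map_map, Function.comp]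
  rw [hmapeq]
  set l := ys.map pvIdx with hl
  have hbounds : ∀ x ∈ l, 0 ≤ x ∧ x < 12 := by
    intro x hx
    rw [hl] at hx
    obtain ⟨y, _, rfl⟩ := List.mem_map.mp hx
    exact pvIdx_bounds y
  have hnod : (PySem.Set.ofList l).Nodup := PySem.Set.nodup_ofList l
  have hnodmap : ((PySem.Set.ofList l).map pvZodiacNameA).Nodup := by
    refine List.Nodup.map_on ?_ hnod
    intro a ha b hb h
    have ha' : a ∈ l := (PySem.Set.mem_ofList l a).mp ha
    have hb' : b ∈ l := (PySem.Set.mem_ofList l b).mp hb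
    exact pvName_inj a b (hbounds a ha').1 (hbounds a ha').2 (hbounds b hb').1 (hbounds b hb').2 h
  have hperm : (PySem.Set.ofList (l.map pvZodiacNameA)).Perm ((PySem.Set.ofList l).map pvZodiacNameA) := by
    refine (List.perm_ext_iff_of_nodup (PySem.Set.nodup_ofList _) hnodmap).mpr ?_
    intro s
    constructor
    · intro hs
      have : s ∈ l.map pvZodiacNameA := (PySem.Set.mem_ofList _ s).mp hs
      obtain ⟨x, hx, rfl⟩ := List.mem_map.mp this
      exact List.mem_map.mpr ⟨x, (PySem.Set.mem_ofList l x).mpr hx, rfl⟩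
    · intro hs
      obtain ⟨x, hx, rfl⟩ := List.mem_map.mp hs
      refine (PySem.Set.mem_ofList _ _).mpr ?_
      exact List.mem_map.mpr ⟨x, (PySem.Set.mem_ofList l x).mp hx, rfl⟩
  rw [hperm.length_eq, List.length_map]

-- earliest side: A's running earliest is the name of the running minimum index
lemma pvFoldl_stepE (ys : List Int) (m : Int) (h0 : 0 ≤ m) (h1 : m < 12) :
    ys.foldl pvStepE (pvZodiacNameA m) =
      pvZodiacNameA (ys.foldl (fun a y => min a (pvIdx y)) m) := by
  induction ys generalizing m with
  | nil => rfl
  | cons y t ih =>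
    have hy := pvIdx_bounds y
    have hstep : pvStepE (pvZodiacNameA m) y = pvZodiacNameA (min m (pvIdx y)) := by
      simp only [pvStepE, pvOrder_name _ h0 h1, pvOrder_name _ hy.1 hy.2]
      by_cases h : pvIdx y < m
      · rw [if_pos h, min_eq_right (le_of_lt h)]
      · rw [if_neg h, min_eq_left (le_of_not_gt h)]
    simp only [List.foldl_cons, hstep]
    exact ih (min m (pvIdx y)) (le_min h0 hy.1) (lt_of_le_of_lt (min_le_left _ _) h1)

lemma pvFoldl_min_le_init (t : List Int) (a : Int) : t.foldl min a ≤ a := by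
  induction t generalizing a with
  | nil => simp
  | cons x s ih => exact le_trans (ih (min a x)) (min_le_left a x)

lemma pvFoldl_min_le_mem (t : List Int) (a x : Int) (hx : x ∈ t) : t.foldl min a ≤ x := by
  induction t generalizing a with
  | nil => cases hx
  | cons z s ih =>
    rcases List.mem_cons.mp hx with rfl | hx'
    · exact le_trans (pvFoldl_min_le_init s (min a x)) (min_le_right a x)
    · exact ih (min a z) hx'

lemma pvFoldl_min_mem_or (t : List Int) (a : Int) : t.foldl min a = a ∨ t.foldl min a ∈ t := by
  induction t generalizing a with
  | nil => exact Or.inl rfl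
  | cons x s ih =>
    rcases ih (min a x) with h | h
    · rw [List.foldl_cons, h]
      rcases le_total a x with hax | hxa
      · exact Or.inl (min_eq_left hax)
      · exact Or.inr (by rw [min_eq_right hxa]; exact List.mem_cons_self)
    · exact Or.inr (List.mem_cons_of_mem x h)

lemma pvFoldl_min_bounds (t : List Int) (a : Int) (h0 : 0 ≤ a) (h1 : a < 12)
    (hb : ∀ x ∈ t, 0 ≤ x ∧ x < 12) : 0 ≤ t.foldl min a ∧ t.foldl min a < 12 := by
  induction t generalizing a with
  | nil => exact ⟨h0, h1⟩
  | cons x s ih =>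
    have hx := hb x (List.mem_cons_self)
    exact ih (min a x) (le_min h0 hx.1) (lt_of_le_of_lt (min_le_left a x) h1)
      (fun z hz => hb z (List.mem_cons_of_mem x hz))

-- B side: the bucket table after the first pass records membership of each residue
lemma pvSeen_len (ys : List Int) (s : List Bool) : (ys.foldl pvSeenStep s).length = s.length := by
  induction ys generalizing s with
  | nil => rfl
  | cons y t ih => simpa [pvSeenStep] using ih (pvSeenStep s y)

lemma pvSeen_get (ys : List Int) (s : List Bool) (hs : s.length = 12) (i : Nat) (hi : i < 12) :
    (ys.foldl pvSeenStep s).getD i false = (s.getD i false || decide ((i : Int) ∈ ys.map pvIdx)) := by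
  induction ys generalizing s with
  | nil => simp
  | cons y t ih =>
    have hlen : (pvSeenStep s y).length = 12 := by simp [pvSeenStep, hs]
    rw [List.foldl_cons, ih (pvSeenStep s y) hlen]
    have hy := pvIdx_bounds y
    have hdef : pvSeenStep s y = s.set (pvIdx y).toNat true := rfl
    have hset : (pvSeenStep s y).getD i false =
        (decide ((i : Int) = pvIdx y) || s.getD i false) := by
      rw [hdef, List.getD_eq_getElem?_getD, List.getElem?_set]
      by_cases h : (i : Int) = pvIdx y
      · have htn : (pvIdx y).toNat = i := by omega
        simp [htn, hs, hi, h]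
      · have htn : (pvIdx y).toNat ≠ i := by omega
        simp [htn, h, List.getD_eq_getElem?_getD]
    rw [hset]
    simp only [List.map_cons, List.mem_cons]
    cases hd1 : decide ((i : Int) = pvIdx y) <;>
      simp_all [List.getD_eq_getElem?_getD]

-- B side: the downward sweep, read as a foldr over the ascending range, is count + first hit
lemma pvSweep_foldr (b : Int → Bool) (l : List Int) :
    l.foldr (fun i (st : Int × Int) => if b i then (st.1 + 1, i) else st) ((0 : Int), (11 : Int))
      = (((l.countP b : Nat) : Int), ((l.find? b).getD 11)) := by
  induction l with
  | nil => simp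
  | cons i t ih =>
    by_cases h : b i <;> simp [h, ih]

lemma pvFind?_congr {α : Type} (l : List α) (p q : α → Bool) (h : ∀ x ∈ l, p x = q x) :
    l.find? p = l.find? q := by
  induction l with
  | nil => rfl
  | cons x t ih =>
    have hx := h x List.mem_cons_self
    by_cases hp : p x
    · rw [List.find?_cons_of_pos hp, List.find?_cons_of_pos (hx ▸ hp)]
    · rw [List.find?_cons_of_neg hp, List.find?_cons_of_neg (by rw [← hx]; exact hp),
        ih (fun z hz => h z (List.mem_cons_of_mem x hz))]

-- counting the residues present among 0..11 counts the distinct residues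
lemma pvCount_bridge (idx : List Int) (hb : ∀ x ∈ idx, 0 ≤ x ∧ x < 12) :
    (PySem.List.pyRange 0 12 1).countP (fun i => decide (i ∈ idx))
      = (PySem.Set.ofList idx).length := by
  rw [List.countP_eq_length_filter]
  have hnodf : ((PySem.List.pyRange 0 12 1).filter (fun i => decide (i ∈ idx))).Nodup :=
    (PySem.List.nodup_pyRange_one 0 12).filter _
  have hperm : ((PySem.List.pyRange 0 12 1).filter (fun i => decide (i ∈ idx))).Perm
      (PySem.Set.ofList idx) := by
    refine (List.perm_ext_iff_of_nodup hnodf (PySem.Set.nodup_ofList idx)).mpr ?_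
    intro x
    rw [List.mem_filter, PySem.Set.mem_ofList, PySem.List.mem_pyRange_one]
    constructor
    · exact fun h => of_decide_eq_true h.2
    · intro h
      exact ⟨⟨(hb x h).1, (hb x h).2⟩, decide_eq_true h⟩
  exact hperm.length_eq

-- the first residue present among 0..11 is the minimum residue (11 when none is present)
lemma pvFind_bridge (idx : List Int) (hb : ∀ x ∈ idx, 0 ≤ x ∧ x < 12) :
    ((PySem.List.pyRange 0 12 1).find? (fun i => decide (i ∈ idx))).getD 11
      = idx.foldl min 11 := by
  rcases List.eq_nil_or_concat' idx with rfl | ⟨t, x0, rfl⟩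
  · rw [show (PySem.List.pyRange 0 12 1).find? (fun i => decide (i ∈ ([] : List Int))) = none from
      by rw [List.find?_eq_none]; intro x _; simp]
    rfl
  · set idx := t ++ [x0] with hidx
    set m := idx.foldl min 11 with hm
    have hx0 : x0 ∈ idx := by rw [hidx]; exact List.mem_append_right t List.mem_cons_self
    have hmb := pvFoldl_min_bounds idx 11 (by norm_num) (by norm_num) hb
    have hmle : ∀ x ∈ idx, m ≤ x := fun x hx => pvFoldl_min_le_mem idx 11 x hx
    have hmem : m ∈ idx := by
      rcases pvFoldl_min_mem_or idx 11 with h | h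
      · have h1 : m ≤ x0 := hmle x0 hx0
        have h2 : x0 < 12 := (hb x0 hx0).2
        have : x0 = m := by omega
        rwa [← this]
      · exact h
    have hsplit : PySem.List.pyRange 0 12 1 =
        PySem.List.pyRange 0 m 1 ++ PySem.List.pyRange m 12 1 :=
      PySem.List.pyRange_one_append 0 m 12 hmb.1 (le_of_lt hmb.2)
    have hnone : (PySem.List.pyRange 0 m 1).find? (fun i => decide (i ∈ idx)) = none := by
      rw [List.find?_eq_none]
      intro j hj
      have hjm : j < m := ((PySem.List.mem_pyRange_one).mp hj).2
      simp only [decide_eq_true_eq]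
      intro hjin
      exact absurd (hmle j hjin) (by omega)
    have hcons : PySem.List.pyRange m 12 1 = m :: PySem.List.pyRange (m + 1) 12 1 :=
      PySem.List.pyRange_one_cons hmb.2
    rw [hsplit, List.find?_append, hnone, Option.none_or, hcons]
    simp [hmem]

-- ===== VERDICT (by name: the statement is the Claim_ definition above) =====
theorem find_earliest_zodiac_spec : Claim_equal_find_earliest_zodiac := by
  intro years _
  unfold Spec_find_earliest_zodiac find_earliest_zodiac find_earliest_zodiac_alt
  rw [pvFoldl_split]
  set idx := years.map pvIdx with hidx
  have hb : ∀ x ∈ idx, 0 ≤ x ∧ x < 12 := by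
    intro x hx
    obtain ⟨y, _, rfl⟩ := List.mem_map.mp hx
    exact pvIdx_bounds y
  -- the bucket table records membership of each residue
  set seen := years.foldl pvSeenStep (List.replicate 12 false) with hseen
  have hslen : seen.length = 12 := by rw [hseen, pvSeen_len]; simp
  have hlook : ∀ i ∈ PySem.List.pyRange 0 12 1,
      ((PySem.List.pyGet? seen i).getD false) = decide (i ∈ idx) := by
    intro i hi
    obtain ⟨h0, h1⟩ := (PySem.List.mem_pyRange_one).mp hi
    have hn : i.toNat < 12 := by omega
    rw [PySem.List.pyGet?_of_nonneg seen h0, ← List.getD_eq_getElem?_getD,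
      hseen, pvSeen_get years _ (by simp) i.toNat hn]
    have hrep : (List.replicate 12 false).getD i.toNat false = false := by
      rw [List.getD_eq_getElem?_getD, List.getElem?_replicate]
      simp [hn]
    rw [hrep, Bool.false_or, Int.toNat_of_nonneg h0, ← hidx]
  -- the downward sweep = foldr over the ascending range
  have hsweep : (PySem.List.pyRange 11 (-1) (-1)).foldl (pvSweepStep seen) (0, 11)
      = (((PySem.Set.ofList idx).length : Int), idx.foldl min 11) := by
    have h0 : PySem.List.pyRange 11 (-1) (-1) = (PySem.List.pyRange 0 12 1).reverse := by
      have := PySem.List.pyRange_neg_one_eq_reverse 11 (-1)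
      norm_num at this
      exact this
    rw [h0, List.foldl_reverse]
    show (PySem.List.pyRange 0 12 1).foldr
        (fun i st => if (PySem.List.pyGet? seen i).getD false then (st.1 + 1, i) else st)
        ((0 : Int), (11 : Int)) = _
    rw [pvSweep_foldr]
    rw [List.countP_congr (fun x hx => by rw [hlook x hx]),
      pvFind?_congr _ _ _ hlook, pvCount_bridge idx hb, pvFind_bridge idx hb]
  simp only [hsweep]
  have hm := pvFoldl_min_bounds idx 11 (by norm_num) (by norm_num) hb
  refine Prod.ext ?_ ?_
  · -- counts
    show ((years.foldl pvStepC PySem.Dict.empty).size : Int) = _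
    rw [show (years.foldl pvStepC PySem.Dict.empty).size
        = (years.foldl pvStepC PySem.Dict.empty).keys.length from
        by simp [PySem.Dict.size, PySem.Dict.keys],
      pvKeys_counts, pvLen_ofList_map]
  · -- earliest
    show years.foldl pvStepE "Pig" = _
    have hpig : "Pig" = pvZodiacNameA 11 := by decide
    rw [hpig, pvFoldl_stepE years 11 (by norm_num) (by norm_num)]
    have hfold : years.foldl (fun a y => min a (pvIdx y)) 11 = idx.foldl min 11 := by
      rw [hidx, List.foldl_map]
    rw [hfold, pvName_eq _ hm.1 hm.2]
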